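-- pv_equiv track=rewrite | github.com/LOL-32/Extra-Codes | Python/Random Codes/matrics_multiply.py | conv2
-- ===== SOURCE A (Python) =====
-- def  conv2(a,w):
--         temp=[]
--         count=0
--         t=[]
--         for i in a:
--            count = count +1
--            t.append(i)
--            if(count == (w)):
--                temp.append(list(t))
--                t.clear()
--                count=0
--         return transpose(temp,w)
--
-- def  transpose(l,w):
--      t=[]
--      temp=[]
--      for i in range(0,w,1):
--       for j in l:
--         t.append(j[i])
--       temp.append(list(t))
--       del t[:]
--      return temp
-- ===== SOURCE B (Python) =====
-- def conv2(a, w):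
--     # Read the transposed matrix straight off the flat list: output row i
--     # collects a[j*w+i] for each complete source row j; incomplete trailing
--     # elements are dropped by the floor division. range(w) is empty for w<=0,
--     # so the division by w is never evaluated there.
--     return [[a[j*w + i] for j in range(len(a)//w)] for i in range(w)]
-- ===== Notes on version B (the rewrite author's own statement) =====
-- stated objective: simpler
-- what changed: B computes each output element directly from the flat list by index arithmetic a[j*w+i], eliminating A's intermediate chunk matrix and its append/clear accumulator loops.
import Mathlib
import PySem

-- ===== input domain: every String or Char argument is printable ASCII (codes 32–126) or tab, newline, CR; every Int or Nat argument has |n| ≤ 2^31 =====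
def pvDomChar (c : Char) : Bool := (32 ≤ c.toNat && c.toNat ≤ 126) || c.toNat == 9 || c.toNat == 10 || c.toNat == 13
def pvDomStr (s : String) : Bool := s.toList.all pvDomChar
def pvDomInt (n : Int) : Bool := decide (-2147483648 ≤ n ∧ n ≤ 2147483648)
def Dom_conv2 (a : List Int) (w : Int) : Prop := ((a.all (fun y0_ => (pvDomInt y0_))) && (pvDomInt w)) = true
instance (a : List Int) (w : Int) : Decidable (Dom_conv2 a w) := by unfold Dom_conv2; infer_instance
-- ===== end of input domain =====

-- B flattens A's two passes (chunk the list into rows, then transpose) into one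
-- direct index-arithmetic read of the flat list; same cost, no intermediate matrix.

-- ===== PORT A =====
-- transpose(l, w): j[i] is always in range here (every row of l has length w,
-- 0 ≤ i < w), so pyGetD with default 0 is exact.
def transposeA (l : List (List Int)) (w : Int) : List (List Int) :=
  (PySem.List.pyRange 0 w 1).foldl
    (fun temp i =>
      temp ++ [l.foldl (fun t j => t ++ [PySem.List.pyGetD j i 0]) []])
    []

def stepA (w : Int) (st : List (List Int) × Int × List Int) (i : Int) :
    List (List Int) × Int × List Int :=
  let count := st.2.1 + 1
  let t := st.2.2 ++ [i]
  if count = w then (st.1 ++ [t], 0, ([] : List Int)) else (st.1, count, t)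

def conv2 (a : List Int) (w : Int) : List (List Int) :=
  let st := a.foldl (stepA w) ([], 0, [])
  transposeA st.1 w

-- ===== PORT B =====
-- a[j*w+i] is always in range (0 ≤ j*w+i < (len(a)//w)*w ≤ len(a)), so pyGetD 0 is exact.
def conv2_alt (a : List Int) (w : Int) : List (List Int) :=
  (PySem.List.pyRange 0 w 1).map (fun i =>
    (PySem.List.pyRange 0 (PySem.Int.floordiv (a.length : Int) w) 1).map (fun j =>
      PySem.List.pyGetD a (j * w + i) 0))

-- ===== PRECONDITION & SPEC =====
def Spec_conv2 (a : List Int) (w : Int) (out : List (List Int)) : Prop := out = conv2_alt a w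
instance (a : List Int) (w : Int) (out : List (List Int)) : Decidable (Spec_conv2 a w out) := by unfold Spec_conv2; infer_instance

-- ===== CLAIM (what is proved, stated in full; the proofs are below) =====
def Claim_equal_conv2 : Prop := ∀ (a : List Int) (w : Int), Dom_conv2 a w → Spec_conv2 a w (conv2 a w)

-- ===== LEMMAS AND PROOFS =====

-- the list of complete width-W chunks of l (the incomplete tail is dropped)
def chunks (W : Nat) (l : List Int) : List (List Int) :=
  if h : 0 < W ∧ W ≤ l.length then l.take W :: chunks W (l.drop W) else []
termination_by l.length
decreasing_by simp; omega

theorem stepA_eq (w : Int) (st : List (List Int) × Int × List Int) (i : Int) :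
    stepA w st i =
      if st.2.1 + 1 = w then (st.1 ++ [st.2.2 ++ [i]], 0, ([] : List Int))
      else (st.1, st.2.1 + 1, st.2.2 ++ [i]) := rfl

-- A's accumulation loop produces exactly the complete chunks
theorem conv2_loop_chunks (w : Int) (hw : 0 < w) :
    ∀ (a : List Int) (temp : List (List Int)) (c : Int) (t : List Int),
      c = (t.length : Int) → (t.length : Int) < w →
      (a.foldl (stepA w) (temp, c, t)).1 = temp ++ chunks w.toNat (t ++ a) := by
  intro a
  induction a with
  | nil =>
    intro temp c t hc ht
    simp only [List.foldl_nil, List.append_nil]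
    rw [chunks]
    rw [dif_neg (by omega : ¬ (0 < w.toNat ∧ w.toNat ≤ t.length))]
    simp
  | cons i a ih =>
    intro temp c t hc ht
    rw [List.foldl_cons, stepA_eq]
    simp only []
    by_cases h : c + 1 = w
    · rw [if_pos h]
      rw [ih (temp ++ [t ++ [i]]) 0 [] (by simp) (by simpa using hw)]
      have hlen : (t ++ [i]).length = w.toNat := by simp; omega
      conv_rhs => rw [chunks]
      have hc2 : 0 < w.toNat ∧ w.toNat ≤ (t ++ i :: a).length := by simp; omega
      rw [dif_pos hc2]
      have hsplit : t ++ i :: a = (t ++ [i]) ++ a := by simp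
      have htake : (t ++ i :: a).take w.toNat = t ++ [i] := by
        rw [hsplit, List.take_append_of_le_length (by omega),
          List.take_of_length_le (by omega)]
      have hdrop : (t ++ i :: a).drop w.toNat = a := by
        rw [hsplit, List.drop_append_of_le_length (by omega),
          List.drop_of_length_le (by omega)]
        simp
      rw [htake, hdrop]
      simp
    · rw [if_neg h]
      rw [ih temp (c + 1) (t ++ [i]) (by simp; omega) (by simp; omega)]
      simp

-- fold-with-append is map
theorem foldl_append_map {α β : Type} (f : α → β) (l : List α) :
    ∀ init : List β, l.foldl (fun acc x => acc ++ [f x]) init = init ++ l.map f := by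
  induction l with
  | nil => simp
  | cons x l ih => intro init; simp [ih]

theorem transposeA_eq_map (l : List (List Int)) (w : Int) :
    transposeA l w =
      (PySem.List.pyRange 0 w 1).map (fun i => l.map (fun j => PySem.List.pyGetD j i 0)) := by
  unfold transposeA
  have hinner : ∀ i : Int,
      l.foldl (fun t j => t ++ [PySem.List.pyGetD j i 0]) [] =
        l.map (fun j => PySem.List.pyGetD j i 0) := by
    intro i
    rw [foldl_append_map (fun j => PySem.List.pyGetD j i 0) l []]
    simp
  calc (PySem.List.pyRange 0 w 1).foldl
        (fun temp i => temp ++ [l.foldl (fun t j => t ++ [PySem.List.pyGetD j i 0]) []]) []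
      = [] ++ (PySem.List.pyRange 0 w 1).map
          (fun i => l.foldl (fun t j => t ++ [PySem.List.pyGetD j i 0]) []) :=
        foldl_append_map _ _ []
    _ = _ := by
        simp only [List.nil_append]
        exact List.map_congr_left (fun i _ => hinner i)

-- reading column i of the chunk matrix = reading a[j*W+i] for each complete row j
theorem chunks_col (W : Nat) (hW : 0 < W) (i : Nat) (hi : i < W) :
    ∀ l : List Int,
      (chunks W l).map (fun r => PySem.List.pyGetD r (i : Int) 0) =
      (List.range (l.length / W)).map
        (fun j => PySem.List.pyGetD l (((j * W + i : Nat) : Int)) 0) := by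
  intro l
  induction hn : l.length using Nat.strong_induction_on generalizing l with
  | _ n ih =>
    subst hn
    rw [chunks]
    by_cases h : 0 < W ∧ W ≤ l.length
    · rw [dif_pos h]
      have hq : l.length / W = (l.length - W) / W + 1 := Nat.div_eq_sub_div hW h.2
      rw [hq, List.range_succ_eq_map]
      simp only [List.map_cons, List.map_map]
      congr 1
      · -- head: (l.take W)[i] = l[0*W+i]
        simp only [PySem.List.pyGetD_natCast, List.getD, Nat.zero_mul, Nat.zero_add]
        rw [List.getElem?_take]
        simp [hi]
      · -- tail: chunks of drop W, with indices shifted by W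
        rw [ih (l.length - W) (by omega) (l.drop W) (by simp)]
        apply List.map_congr_left
        intro j _
        simp only [Function.comp_apply, PySem.List.pyGetD_natCast, List.getD]
        have hsh : Nat.succ j * W + i = W + (j * W + i) := by
          rw [Nat.succ_eq_add_one]; ring
        rw [hsh, List.getElem?_drop]
    · rw [dif_neg h]
      rw [Nat.div_eq_of_lt (by omega)]
      simp

theorem conv2_eq (a : List Int) (w : Int) : conv2 a w = conv2_alt a w := by
  by_cases hw : 0 < w
  · unfold conv2
    simp only []
    rw [conv2_loop_chunks w hw a [] 0 [] (by simp) (by simpa using hw)]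
    simp only [List.nil_append]
    rw [transposeA_eq_map]
    unfold conv2_alt
    apply List.map_congr_left
    intro i hi
    rw [PySem.List.mem_pyRange_one] at hi
    have hInat : i = (i.toNat : Int) := by omega
    have hwnat : w = (w.toNat : Int) := by omega
    rw [hInat, chunks_col w.toNat (by omega) i.toNat (by omega) a]
    have hfd : PySem.Int.floordiv (a.length : Int) w = ((a.length / w.toNat : Nat) : Int) := by
      rw [hwnat]; exact PySem.Int.floordiv_natCast a.length w.toNat
    rw [hfd, PySem.List.pyRange_one, List.map_map]
    rw [show (((a.length / w.toNat : Nat) : Int) - 0).toNat = a.length / w.toNat from by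
      rw [Int.sub_zero, Int.toNat_natCast]]
    apply List.map_congr_left
    intro j _
    simp only [Function.comp_apply]
    congr 1
    push_cast
    rw [Int.toNat_of_nonneg (by omega : (0:Int) ≤ w)]
    ring
  · unfold conv2 conv2_alt transposeA
    rw [PySem.List.pyRange_one_eq_nil (by omega)]
    simp

-- ===== VERDICT (by name: the statement is the Claim_ definition above) =====
theorem conv2_spec : Claim_equal_conv2 := by
  intro a w _
  unfold Spec_conv2
  exact conv2_eq a w
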